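-- pv_equiv track=rewrite | github.com/benquick123/code-profiling | code/batch-2/vse-naloge-brez-testov/DN12-M-071.py | sosedi
-- ===== SOURCE A (Python) =====
-- def sosedi(doslej, zemljevid):
--     list = set()
--     for element in doslej:
--         list = list | set(zemljevid[element])
--     for element in doslej:
--         try:
--             list.remove(element)
--         except:
--             continue
--     return(list)
-- ===== SOURCE B (Python) =====
-- def sosedi(doslej, zemljevid):
--     doslej_set = set(doslej)
--     return {n for e in doslej for n in zemljevid[e] if n not in doslej_set}
-- ===== Notes on version B (the rewrite author's own statement) =====
-- stated objective: simpler
-- what changed: Replaces A's two-phase strategy (build the full union of neighbor sets, then a second loop removing each doslej node via try/except) with a single filtered set comprehension that skips doslej members while collecting, using a precomputed set of doslej.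
import Mathlib
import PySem

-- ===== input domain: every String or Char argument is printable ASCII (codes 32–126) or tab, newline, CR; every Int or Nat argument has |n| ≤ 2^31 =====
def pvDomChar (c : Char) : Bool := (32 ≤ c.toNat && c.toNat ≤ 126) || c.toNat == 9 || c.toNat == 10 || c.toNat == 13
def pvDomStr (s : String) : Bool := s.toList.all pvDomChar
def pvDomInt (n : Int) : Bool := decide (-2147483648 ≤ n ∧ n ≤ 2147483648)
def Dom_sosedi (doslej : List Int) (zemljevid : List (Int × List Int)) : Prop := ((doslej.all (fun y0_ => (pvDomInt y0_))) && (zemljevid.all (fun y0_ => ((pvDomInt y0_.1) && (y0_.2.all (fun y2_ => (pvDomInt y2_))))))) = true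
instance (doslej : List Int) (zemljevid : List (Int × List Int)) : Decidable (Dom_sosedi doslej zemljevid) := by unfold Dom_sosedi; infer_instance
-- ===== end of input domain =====

-- B fuses A's two phases (union of neighbor sets, then try/except removal of each doslej node) into one collecting pass that filters doslej members inline.


-- ===== PORT A =====
-- list = set(); for element in doslej: list = list | set(zemljevid[element]);
-- for element in doslej: try: list.remove(element) except: continue; return list
-- (zemljevid[element] -> first-match association-list lookup, total via getD []; Pre_sosedi guarantees the key is present)
def sosedi (doslej : List Int) (zemljevid : List (Int × List Int)) : List Int :=
  let s : PySem.Set Int := doslej.foldl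
    (fun s element =>
      PySem.Set.union s (PySem.Set.ofList ((zemljevid.lookup element).getD [])))
    PySem.Set.empty
  doslej.foldl
    (fun s element =>
      match PySem.Set.remove? s element with
      | some s' => s'        -- remove succeeded
      | none => s)           -- KeyError caught: continue
    s

-- ===== PORT B =====
-- doslej_set = set(doslej); {n for e in doslej for n in zemljevid[e] if n not in doslej_set}
def sosedi_alt (doslej : List Int) (zemljevid : List (Int × List Int)) : List Int :=
  let doslejSet : PySem.Set Int := PySem.Set.ofList doslej
  doslej.foldl
    (fun acc e =>
      ((zemljevid.lookup e).getD []).foldl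
        (fun acc n => if PySem.Set.contains doslejSet n then acc else PySem.Set.add acc n)
        acc)
    PySem.Set.empty

-- ===== PRECONDITION & SPEC =====
-- Pre_ excludes exactly the inputs where zemljevid[element] raises KeyError in Python A (B raises there too).
def Pre_sosedi (doslej : List Int) (zemljevid : List (Int × List Int)) : Prop :=
  ∀ e ∈ doslej, e ∈ zemljevid.map Prod.fst
instance (doslej : List Int) (zemljevid : List (Int × List Int)) : Decidable (Pre_sosedi doslej zemljevid) := by unfold Pre_sosedi; infer_instance
def pvWitness_sosedi : List Int × (List (Int × List Int)) := ([0, 1], [(0, [1, 2]), (1, [0, 3])])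

def Spec_sosedi (doslej : List Int) (zemljevid : List (Int × List Int)) (out : List Int) : Prop := out = sosedi_alt doslej zemljevid
instance (doslej : List Int) (zemljevid : List (Int × List Int)) (out : List Int) : Decidable (Spec_sosedi doslej zemljevid out) := by unfold Spec_sosedi; infer_instance

-- ===== CLAIM (what is proved, stated in full; the proofs are below) =====
def Claim_equal_sosedi : Prop := ∀ (doslej : List Int) (zemljevid : List (Int × List Int)), Dom_sosedi doslej zemljevid → Pre_sosedi doslej zemljevid → Spec_sosedi doslej zemljevid (sosedi doslej zemljevid)

-- ===== LEMMAS AND PROOFS =====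

-- membership is preserved/absorbed by foldl add
theorem pv_mem_foldl_add (u : List Int) (s : PySem.Set Int) (x : Int)
    (h : x ∈ s ∨ x ∈ u) : x ∈ u.foldl PySem.Set.add s := by
  induction u generalizing s with
  | nil => simpa using h.resolve_right (by simp)
  | cons a u ih =>
    refine ih (PySem.Set.add s a) ?_
    rcases h with h | h
    · exact Or.inl (by simp [PySem.Set.add]; split <;> simp [h])
    · rcases List.mem_cons.mp h with rfl | h
      · exact Or.inl (by simp [PySem.Set.add, PySem.Set.contains]; split <;> simp_all)
      · exact Or.inr h

-- folding the elements of `add u x` = folding those of u, then adding x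
theorem pv_foldl_add_set_add (u : PySem.Set Int) (s : PySem.Set Int) (x : Int) :
    List.foldl PySem.Set.add s (PySem.Set.add u x)
      = PySem.Set.add (List.foldl PySem.Set.add s u) x := by
  by_cases h : x ∈ u
  · have hx : x ∈ List.foldl PySem.Set.add s u := pv_mem_foldl_add u s x (Or.inr h)
    simp [PySem.Set.add, PySem.Set.contains, h, hx]
  · simp [PySem.Set.add, PySem.Set.contains, h, List.foldl_append]

theorem pv_foldl_add_assoc (l : List Int) (u s : PySem.Set Int) :
    List.foldl PySem.Set.add s (List.foldl PySem.Set.add u l)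
      = List.foldl PySem.Set.add (List.foldl PySem.Set.add s u) l := by
  induction l generalizing u s with
  | nil => rfl
  | cons a l ih =>
    simp only [List.foldl_cons]
    rw [ih (PySem.Set.add u a) s, pv_foldl_add_set_add]

-- adding set(l) to s element by element = adding l itself
theorem pv_update_ofList (l : List Int) (s : PySem.Set Int) :
    List.foldl PySem.Set.add s (PySem.Set.ofList l) = List.foldl PySem.Set.add s l := by
  have := pv_foldl_add_assoc l PySem.Set.empty s
  simpa [PySem.Set.ofList, PySem.Set.empty] using this

-- A's union-build loop, with each set(zemljevid[e]) flattened to a plain foldl add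
theorem pv_build (zemljevid : List (Int × List Int)) (es : List Int) (s : PySem.Set Int) :
    es.foldl (fun s element =>
        PySem.Set.union s (PySem.Set.ofList ((zemljevid.lookup element).getD []))) s
      = es.foldl (fun a e => ((zemljevid.lookup e).getD []).foldl PySem.Set.add a) s := by
  induction es generalizing s with
  | nil => rfl
  | cons e es ih =>
    simp only [List.foldl_cons]
    rw [show PySem.Set.union s (PySem.Set.ofList ((zemljevid.lookup e).getD []))
          = ((zemljevid.lookup e).getD []).foldl PySem.Set.add s from
        pv_update_ofList _ s, ih]

-- A's removal loop is one filter
theorem pv_removal_filter (es : List Int) (s : PySem.Set Int) :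
    es.foldl (fun s element => match PySem.Set.remove? s element with
      | some s' => s' | none => s) s
      = s.filter (fun x => !es.contains x) := by
  induction es generalizing s with
  | nil => simp
  | cons e es ih =>
    simp only [List.foldl_cons]
    have hstep : (match PySem.Set.remove? s e with
        | some s' => s' | none => s) = s.filter (fun y => !(y == e)) := by
      by_cases h : e ∈ s
      · simp [PySem.Set.remove?, PySem.Set.contains, PySem.Set.discard, h]
      · simp [PySem.Set.remove?, PySem.Set.contains, h]
        exact (List.filter_eq_self.mpr (fun a ha => by
          simp; exact fun hae => h (hae ▸ ha))).symm
    rw [hstep, ih, List.filter_filter]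
    congr 1
    funext x
    by_cases hxe : x = e
    · subst hxe; simp
    · simp [hxe]

theorem pv_filter_add (pf : Int → Bool) (s : PySem.Set Int) (n : Int) (hn : pf n = true) :
    PySem.Set.add (s.filter pf) n = (PySem.Set.add s n).filter pf := by
  by_cases h : n ∈ s
  · simp [PySem.Set.add, PySem.Set.contains, h, hn]
  · simp [PySem.Set.add, PySem.Set.contains, h, hn]

theorem pv_filter_add_absorb (pf : Int → Bool) (s : PySem.Set Int) (n : Int) (hn : pf n = false) :
    s.filter pf = (PySem.Set.add s n).filter pf := by
  by_cases h : n ∈ s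
  · simp [PySem.Set.add, PySem.Set.contains, h]
  · simp [PySem.Set.add, PySem.Set.contains, h, hn]

theorem pv_contains_ofList (l : List Int) (x : Int) :
    PySem.Set.contains (PySem.Set.ofList l) x = l.contains x := by
  simp [PySem.Set.contains]

-- B's inner pass on a filtered accumulator = unconditional adds, filtered afterwards
theorem pv_inner (doslej l : List Int) (acc : PySem.Set Int) :
    l.foldl (fun a n => if PySem.Set.contains (PySem.Set.ofList doslej) n then a else PySem.Set.add a n)
        (acc.filter (fun x => !doslej.contains x))
      = (l.foldl PySem.Set.add acc).filter (fun x => !doslej.contains x) := by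
  induction l generalizing acc with
  | nil => rfl
  | cons n l ih =>
    simp only [List.foldl_cons]
    have hc : PySem.Set.contains (PySem.Set.ofList doslej) n = doslej.contains n :=
      pv_contains_ofList _ _
    rw [hc]
    by_cases h : doslej.contains n = true
    · rw [if_pos h, pv_filter_add_absorb (fun x => !doslej.contains x) acc n (by simpa using h), ih]
    · have h' : doslej.contains n = false := by simpa using h
      rw [if_neg h, pv_filter_add (fun x => !doslej.contains x) acc n (by simpa using h'), ih]

-- B's whole loop on a filtered accumulator = A's build loop, filtered afterwards
theorem pv_outer (zemljevid : List (Int × List Int)) (doslej es : List Int) (acc : PySem.Set Int) :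
    es.foldl (fun acc e =>
        ((zemljevid.lookup e).getD []).foldl
          (fun acc n => if PySem.Set.contains (PySem.Set.ofList doslej) n then acc else PySem.Set.add acc n)
          acc)
        (acc.filter (fun x => !doslej.contains x))
      = (es.foldl (fun a e => ((zemljevid.lookup e).getD []).foldl PySem.Set.add a) acc).filter
          (fun x => !doslej.contains x) := by
  induction es generalizing acc with
  | nil => rfl
  | cons e es ih =>
    simp only [List.foldl_cons]
    rw [pv_inner doslej ((zemljevid.lookup e).getD []) acc, ih]

-- ===== VERDICT (by name: the statement is the Claim_ definition above) =====
theorem sosedi_spec : Claim_equal_sosedi := by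
  intro doslej zemljevid _ _
  show sosedi doslej zemljevid = sosedi_alt doslej zemljevid
  unfold sosedi sosedi_alt
  rw [pv_build, pv_removal_filter]
  have h := pv_outer zemljevid doslej doslej PySem.Set.empty
  simpa [PySem.Set.empty] using h.symm
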